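-- pv_equiv track=rewrite | github.com/Sacimini/AoC2023 | Day 13/Day 13 2.py | findMyReflectionDifferences
-- ===== SOURCE A (Python) =====
-- def findMyReflectionDifferences(mirrorMap):
--   for mapColumn in range(1, len(mirrorMap[0])):
--     nextColumn = min(mapColumn, len(mirrorMap[0])-mapColumn)
--     numberOfDifferences = 0
--     for mapRow in mirrorMap:
--       for source, target in zip(mapRow[mapColumn-nextColumn:mapColumn], mapRow[mapColumn:mapColumn+nextColumn][::-1]):
--          if source != target:
--             numberOfDifferences +=1
--       if numberOfDifferences > 1:
--          break
--     if numberOfDifferences == 1: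
--        return mapColumn
-- ===== SOURCE B (Python) =====
-- def _axisDiff(row, width, c):
--     n = min(c, width - c)
--     hi = min(len(row), c + n)
--     d = 0
--     for t in range(max(0, hi - c)):
--         if row[c - n + t] != row[hi - 1 - t]:
--             d += 1
--     return d
--
--
-- def findMyReflectionDifferences(mirrorMap):
--     width = len(mirrorMap[0])
--     counts = [0] * (width - 1)
--     for row in mirrorMap:
--         counts = [counts[c - 1] + _axisDiff(row, width, c) for c in range(1, width)]
--     for c in range(1, width):
--         if counts[c - 1] == 1:
--             return c
--     return None
-- ===== Notes on version B (the rewrite author's own statement) =====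
-- stated objective: alternative
-- what changed: B replaces A's per-axis slice/reverse/zip character scan with direct mirror-pair index comparisons, accumulates them row-major into a per-axis counts list (no early break), and then scans for the first axis with exactly one difference.
-- outside the precondition, e.g. on findMyReflectionDifferences([]): A raises IndexError, B raises IndexError
import Mathlib
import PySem

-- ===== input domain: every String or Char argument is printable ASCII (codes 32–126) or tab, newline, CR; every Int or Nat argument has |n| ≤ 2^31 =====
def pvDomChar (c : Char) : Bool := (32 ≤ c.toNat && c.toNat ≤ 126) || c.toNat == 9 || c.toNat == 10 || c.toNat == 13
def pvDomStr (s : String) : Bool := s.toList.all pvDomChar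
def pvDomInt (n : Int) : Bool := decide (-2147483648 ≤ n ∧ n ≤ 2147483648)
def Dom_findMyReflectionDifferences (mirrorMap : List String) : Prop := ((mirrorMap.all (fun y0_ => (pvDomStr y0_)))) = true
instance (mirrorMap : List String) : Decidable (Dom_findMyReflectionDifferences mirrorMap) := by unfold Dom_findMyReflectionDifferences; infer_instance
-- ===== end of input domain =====

-- B replaces A's per-axis slice/reverse/zip scan with direct mirror-pair index comparisons
-- accumulated row-major into a per-axis counts list (alternative decomposition, same cost).

-- ===== PORT A =====
-- inner loop: numberOfDifferences over zip(mapRow[c-n:c], mapRow[c:c+n][::-1]);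
-- the [::-1] is List.reverse, exact by PySem.List.slice?_none_none_neg_one
def pvA_rowCount (c n : Nat) (row : List Char) (k : Int) : Int :=
  ((PySem.List.slice row (some ((c - n : Nat) : Int)) (some ((c : Nat) : Int))).zip
      ((PySem.List.slice row (some ((c : Nat) : Int)) (some ((c + n : Nat) : Int))).reverse)).foldl
    (fun acc p => if p.1 != p.2 then acc + 1 else acc) k

-- 'for mapRow in mirrorMap: … if numberOfDifferences > 1: break'
def pvA_rows (c n : Nat) : List String → Int → Int
  | [], k => k
  | r :: rs, k =>
    let k' := pvA_rowCount c n r.toList k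
    if 1 < k' then k' else pvA_rows c n rs k'

-- 'for mapColumn in range(1, len(mirrorMap[0])): … if numberOfDifferences == 1: return mapColumn'
def pvA_cols (mirrorMap : List String) (W : Nat) : Nat → Nat → Option Int
  | 0, _ => none
  | rem + 1, c =>
    if pvA_rows c (min c (W - c)) mirrorMap 0 = 1 then some ((c : Nat) : Int)
    else pvA_cols mirrorMap W rem (c + 1)

def findMyReflectionDifferences (mirrorMap : List String) : Option Int :=
  let W := (mirrorMap.headD "").length   -- len(mirrorMap[0]); Pre_ excludes the empty list
  pvA_cols mirrorMap W (W - 1) 1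

-- ===== PORT B =====
def pvB_axisDiff (row : List Char) (W c : Nat) : Int :=
  let n := min c (W - c)
  let hi := min row.length (c + n)
  (List.range (hi - c)).foldl
    (fun d t => if row.getD (c - n + t) ' ' != row.getD (hi - 1 - t) ' ' then d + 1 else d) 0

def findMyReflectionDifferences_alt (mirrorMap : List String) : Option Int :=
  let W := (mirrorMap.headD "").length   -- len(mirrorMap[0]); Pre_ excludes the empty list
  let counts := mirrorMap.foldl
    (fun counts row =>
      (List.range' 1 (W - 1)).map (fun c => counts.getD (c - 1) 0 + pvB_axisDiff row.toList W c))
    (List.replicate (W - 1) (0 : Int))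
  (List.range' 1 (W - 1)).findSome?
    (fun c => if counts.getD (c - 1) 0 = 1 then some ((c : Nat) : Int) else none)

-- ===== PRECONDITION & SPEC =====
-- Pre_ excludes only the empty list, on which Python's mirrorMap[0] raises IndexError.
def Pre_findMyReflectionDifferences (mirrorMap : List String) : Prop := mirrorMap ≠ []
instance (mirrorMap : List String) : Decidable (Pre_findMyReflectionDifferences mirrorMap) := by
  unfold Pre_findMyReflectionDifferences; infer_instance

def pvWitness_findMyReflectionDifferences : List String := ["#.##.", "#.##."]

def Spec_findMyReflectionDifferences (mirrorMap : List String) (out : Option Int) : Prop := out = findMyReflectionDifferences_alt mirrorMap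
instance (mirrorMap : List String) (out : Option Int) : Decidable (Spec_findMyReflectionDifferences mirrorMap out) := by unfold Spec_findMyReflectionDifferences; infer_instance

-- ===== CLAIM (what is proved, stated in full; the proofs are below) =====
def Claim_equal_findMyReflectionDifferences : Prop := ∀ (mirrorMap : List String), Dom_findMyReflectionDifferences mirrorMap → Pre_findMyReflectionDifferences mirrorMap → Spec_findMyReflectionDifferences mirrorMap (findMyReflectionDifferences mirrorMap)

-- ===== LEMMAS AND PROOFS =====

-- total smudge count of one row list at axis c (B's row contribution, summed)
def pvSumAxis (rows : List String) (W c : Nat) : Int :=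
  (rows.map (fun r => pvB_axisDiff r.toList W c)).sum

lemma pv_countP_zip_getD {α β : Type} (p : α → β → Bool) (dα : α) (dβ : β) :
    ∀ (l1 : List α) (l2 : List β),
      (l1.zip l2).countP (fun q => p q.1 q.2) =
      (List.range (min l1.length l2.length)).countP (fun t => p (l1.getD t dα) (l2.getD t dβ)) := by
  intro l1
  induction l1 with
  | nil => intro l2; simp
  | cons a l1 ih =>
    intro l2
    cases l2 with
    | nil => simp
    | cons b l2 =>
      simp [List.countP_cons, List.range_succ_eq_map, List.countP_map, ih l2,
        Function.comp_def, Nat.succ_min_succ]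

lemma pv_getD_reverse {α : Type} (d : α) (l : List α) (t : Nat) (h : t < l.length) :
    l.reverse.getD t d = l.getD (l.length - 1 - t) d := by
  rw [List.getD_eq_getElem?_getD, List.getD_eq_getElem?_getD, List.getElem?_reverse h]

lemma pv_getD_drop_take {α : Type} (d : α) (l : List α) (a m t : Nat)
    (h : t < m) :
    ((l.drop a).take m).getD t d = l.getD (a + t) d := by
  rw [List.getD_eq_getElem?_getD, List.getD_eq_getElem?_getD]
  rw [List.getElem?_take_of_lt h, List.getElem?_drop]

lemma pvB_axisDiff_eq_countP (row : List Char) (W c : Nat) :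
    pvB_axisDiff row W c =
      ((List.range (min row.length (c + min c (W - c)) - c)).countP
        (fun t => row.getD (c - min c (W - c) + t) ' ' != row.getD (min row.length (c + min c (W - c)) - 1 - t) ' ') : Int) := by
  unfold pvB_axisDiff
  rw [PySem.List.foldl_if_add_one]
  simp

lemma pvB_axisDiff_nonneg (row : List Char) (W c : Nat) : 0 ≤ pvB_axisDiff row W c := by
  rw [pvB_axisDiff_eq_countP]; positivity

lemma pvSumAxis_nonneg (rows : List String) (W c : Nat) : 0 ≤ pvSumAxis rows W c := by
  unfold pvSumAxis
  apply List.sum_nonneg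
  intro x hx
  obtain ⟨r, _, rfl⟩ := List.mem_map.mp hx
  exact pvB_axisDiff_nonneg _ _ _

-- the key per-row identity: A's zip over the two slices counts exactly B's index pairs
lemma pv_rowCount_eq (W c : Nat) (hc1 : 1 ≤ c) (hcW : c < W) (row : List Char) (k : Int) :
    pvA_rowCount c (min c (W - c)) row k = k + pvB_axisDiff row W c := by
  set n := min c (W - c) with hn
  have hn1 : 1 ≤ n := by omega
  have hnc : n ≤ c := by omega
  unfold pvA_rowCount
  rw [PySem.List.slice_natCast, PySem.List.slice_natCast, PySem.List.foldl_if_add_one]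
  rw [pvB_axisDiff_eq_countP]
  rw [← hn]
  congr 1
  -- lengths of the two slices
  have hcc : c - (c - n) = n := by omega
  have hcn : c + n - c = n := by omega
  rw [hcc, hcn]
  set L := row.length with hL
  have hlen1 : ((row.drop (c - n)).take n).length = min n (L - (c - n)) := by
    simp [hL]
  have hlen2 : ((row.drop c).take n).length = min n (L - c) := by
    simp [hL]
  rw [pv_countP_zip_getD _ ' ' ' ', List.length_reverse, hlen1, hlen2]
  have hmins : min (min n (L - (c - n))) (min n (L - c)) = min n (L - c) := by omega
  have hrng : min n (L - c) = min L (c + n) - c := by omega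
  rw [hmins, hrng]
  congr 1
  apply List.countP_congr
  intro t ht
  have ht' : t < min L (c + n) - c := by
    simpa using List.mem_range.mp ht
  have h1 : ((row.drop (c - n)).take n).getD t ' ' = row.getD (c - n + t) ' ' := by
    apply pv_getD_drop_take; omega
  have hlen2' : ((row.drop c).take n).length = min n (L - c) := hlen2
  have h2 : ((row.drop c).take n).reverse.getD t ' ' = row.getD (min L (c + n) - 1 - t) ' ' := by
    rw [pv_getD_reverse _ _ _ (by omega : t < ((row.drop c).take n).length)]
    rw [hlen2']
    have h3 : min n (L - c) - 1 - t < n := by omega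
    rw [pv_getD_drop_take _ _ _ _ _ h3]
    congr 1
    omega
  rw [h1, h2]

-- the broken row loop returns the exact total when it is ≤ 1 …
lemma pv_rows_eq_of_le (W c : Nat) (hc1 : 1 ≤ c) (hcW : c < W) :
    ∀ (rows : List String) (k : Int), k + pvSumAxis rows W c ≤ 1 →
      pvA_rows c (min c (W - c)) rows k = k + pvSumAxis rows W c := by
  intro rows
  induction rows with
  | nil => intro k _; simp [pvA_rows, pvSumAxis]
  | cons r rs ih =>
    intro k hk
    have hsum : pvSumAxis (r :: rs) W c = pvB_axisDiff r.toList W c + pvSumAxis rs W c := by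
      simp [pvSumAxis]
    unfold pvA_rows
    rw [pv_rowCount_eq W c hc1 hcW]
    have hrs := pvSumAxis_nonneg rs W c
    rw [if_neg (by omega), ih (k + pvB_axisDiff r.toList W c) (by omega)]
    omega

-- … and a result ≥ 2 when the total is ≥ 2
lemma pv_rows_ge_two (W c : Nat) (hc1 : 1 ≤ c) (hcW : c < W) :
    ∀ (rows : List String) (k : Int), 2 ≤ k + pvSumAxis rows W c →
      2 ≤ pvA_rows c (min c (W - c)) rows k := by
  intro rows
  induction rows with
  | nil => intro k hk; simpa [pvA_rows, pvSumAxis] using hk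
  | cons r rs ih =>
    intro k hk
    have hsum : pvSumAxis (r :: rs) W c = pvB_axisDiff r.toList W c + pvSumAxis rs W c := by
      simp [pvSumAxis]
    unfold pvA_rows
    rw [pv_rowCount_eq W c hc1 hcW]
    by_cases h : 1 < k + pvB_axisDiff r.toList W c
    · rw [if_pos h]; omega
    · rw [if_neg h]; exact ih _ (by omega)

lemma pv_rows_one_iff (W c : Nat) (hc1 : 1 ≤ c) (hcW : c < W) (rows : List String) :
    (pvA_rows c (min c (W - c)) rows 0 = 1) ↔ pvSumAxis rows W c = 1 := by
  by_cases h : pvSumAxis rows W c ≤ 1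
  · rw [pv_rows_eq_of_le W c hc1 hcW rows 0 (by omega)]
    omega
  · have := pv_rows_ge_two W c hc1 hcW rows 0 (by omega)
    omega

lemma pv_getD_map_range' (f : Nat → Int) (k c : Nat) (h1 : 1 ≤ c) (h2 : c ≤ k) :
    ((List.range' 1 k).map f).getD (c - 1) 0 = f c := by
  have hlt : c - 1 < ((List.range' 1 k).map f).length := by simp; omega
  rw [List.getD_eq_getElem _ _ hlt]
  simp
  congr 1
  omega

lemma pv_counts_eq (W : Nat) :
    ∀ (rows : List String) (g : Nat → Int),
      rows.foldl
        (fun counts row =>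
          (List.range' 1 (W - 1)).map (fun c => counts.getD (c - 1) 0 + pvB_axisDiff row.toList W c))
        ((List.range' 1 (W - 1)).map g)
      = (List.range' 1 (W - 1)).map (fun c => g c + pvSumAxis rows W c) := by
  intro rows
  induction rows with
  | nil =>
    intro g
    simp [pvSumAxis]
  | cons r rs ih =>
    intro g
    rw [List.foldl_cons]
    have hstep :
        (List.range' 1 (W - 1)).map (fun c => (((List.range' 1 (W - 1)).map g).getD (c - 1) 0 + pvB_axisDiff r.toList W c))
        = (List.range' 1 (W - 1)).map (fun c => g c + pvB_axisDiff r.toList W c) := by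
      apply List.map_congr_left
      intro c hc
      have := List.mem_range'_1.mp hc
      rw [pv_getD_map_range' g (W - 1) c (by omega) (by omega)]
    rw [hstep, ih]
    apply List.map_congr_left
    intro c _
    have : pvSumAxis (r :: rs) W c = pvB_axisDiff r.toList W c + pvSumAxis rs W c := by
      simp [pvSumAxis]
    omega

lemma pv_findSome?_congr {α β : Type} (f g : α → Option β) :
    ∀ l : List α, (∀ x ∈ l, f x = g x) → l.findSome? f = l.findSome? g := by
  intro l
  induction l with
  | nil => intro _; rfl
  | cons a l ih =>
    intro h
    rw [List.findSome?_cons, List.findSome?_cons, h a (by simp)]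
    cases g a with
    | none => exact ih (fun x hx => h x (by simp [hx]))
    | some b => rfl

lemma pv_cols_eq (mm : List String) (W : Nat) :
    ∀ (rem c : Nat),
      pvA_cols mm W rem c =
        (List.range' c rem).findSome?
          (fun c => if pvA_rows c (min c (W - c)) mm 0 = 1 then some ((c : Nat) : Int) else none) := by
  intro rem
  induction rem with
  | zero => intro c; rfl
  | succ rem ih =>
    intro c
    rw [List.range'_succ, List.findSome?_cons]
    unfold pvA_cols
    by_cases h : pvA_rows c (min c (W - c)) mm 0 = 1
    · simp [h]
    · simp [h, ih (c + 1)]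

lemma pv_main (mm : List String) (W : Nat) :
    pvA_cols mm W (W - 1) 1 =
      (List.range' 1 (W - 1)).findSome?
        (fun c =>
          if (mm.foldl
                (fun counts row =>
                  (List.range' 1 (W - 1)).map
                    (fun c => counts.getD (c - 1) 0 + pvB_axisDiff row.toList W c))
                (List.replicate (W - 1) (0 : Int))).getD (c - 1) 0 = 1
          then some ((c : Nat) : Int) else none) := by
  have hrep : List.replicate (W - 1) (0 : Int) = (List.range' 1 (W - 1)).map (fun _ => 0) := by
    simp [List.map_const']
  rw [hrep, pv_counts_eq W mm (fun _ => 0), pv_cols_eq mm W (W - 1) 1]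
  apply pv_findSome?_congr
  intro c hc
  have hmem := List.mem_range'_1.mp hc
  have hc1 : 1 ≤ c := hmem.1
  have hcW : c < W := by omega
  rw [pv_getD_map_range' _ (W - 1) c (by omega) (by omega)]
  simp only [pv_rows_one_iff W c hc1 hcW mm, zero_add]

-- ===== VERDICT (by name: the statement is the Claim_ definition above) =====
theorem findMyReflectionDifferences_spec : Claim_equal_findMyReflectionDifferences :=
  fun mm _ _ => pv_main mm ((mm.headD "").length)
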